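-- pv_equiv track=rewrite | github.com/nvda-ci/aiperf | src/aiperf/exporters/metrics_json_exporter.py | _infer_unit_from_metric_name
-- ===== SOURCE A (Python) =====
-- def _infer_unit_from_metric_name(metric_name: str) -> str:
--     """Infer unit from metric name based on common naming conventions.
--
--     Args:
--         metric_name: Name of the metric
--
--     Returns:
--         Inferred unit string
--     """
--     name_lower = metric_name.lower()
--
--     if any(x in name_lower for x in ["_seconds", "_duration_s"]):
--         return "s"
--     if any(x in name_lower for x in ["_milliseconds", "_duration_ms", "_ms"]):
--         return "ms"
--     if any(x in name_lower for x in ["_microseconds", "_duration_us", "_us"]):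
--         return "us"
--     if any(x in name_lower for x in ["_bytes", "_size"]):
--         return "bytes"
--     if any(x in name_lower for x in ["_percent", "_perc", "_usage"]):
--         return "%"
--     if any(x in name_lower for x in ["_rate", "_per_s", "_toks_per_s"]):
--         return "/s"
--     if any(x in name_lower for x in ["_count", "_total", "_requests"]):
--         return "count"
--
--     return ""
-- ===== SOURCE B (Python) =====
-- _PATTERNS = (
--     ("_seconds", "s"), ("_duration_s", "s"),
--     ("_milliseconds", "ms"), ("_duration_ms", "ms"), ("_ms", "ms"),
--     ("_microseconds", "us"), ("_duration_us", "us"), ("_us", "us"),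
--     ("_bytes", "bytes"), ("_size", "bytes"),
--     ("_percent", "%"), ("_perc", "%"), ("_usage", "%"),
--     ("_rate", "/s"), ("_per_s", "/s"), ("_toks_per_s", "/s"),
--     ("_count", "count"), ("_total", "count"), ("_requests", "count"),
-- )
--
--
-- def _rank_at(name, i):
--     """Priority rank of the highest-priority pattern starting at position i."""
--     for r, (pat, _unit) in enumerate(_PATTERNS):
--         if name.startswith(pat, i):
--             return r
--     return len(_PATTERNS)
--
--
-- def _infer_unit_from_metric_name(metric_name: str) -> str:
--     # Single left-to-right scan: every pattern starts with '_', so at each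
--     # underscore position take the best (lowest) priority rank of a pattern
--     # anchored there; the overall minimum rank picks the unit.
--     name = metric_name.lower()
--     best = len(_PATTERNS)
--     for i, ch in enumerate(name):
--         if ch == "_":
--             best = min(best, _rank_at(name, i))
--     return _PATTERNS[best][1] if best < len(_PATTERNS) else ""
-- ===== Notes on version B (the rewrite author's own statement) =====
-- stated objective: alternative
-- what changed: Instead of testing seven ordered substring groups, B does one left-to-right scan of the lowercased name: at each underscore position it prefix-matches a flat priority list of (pattern, unit) pairs and keeps the minimum rank; the minimum rank's unit is the answer.
import Mathlib
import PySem

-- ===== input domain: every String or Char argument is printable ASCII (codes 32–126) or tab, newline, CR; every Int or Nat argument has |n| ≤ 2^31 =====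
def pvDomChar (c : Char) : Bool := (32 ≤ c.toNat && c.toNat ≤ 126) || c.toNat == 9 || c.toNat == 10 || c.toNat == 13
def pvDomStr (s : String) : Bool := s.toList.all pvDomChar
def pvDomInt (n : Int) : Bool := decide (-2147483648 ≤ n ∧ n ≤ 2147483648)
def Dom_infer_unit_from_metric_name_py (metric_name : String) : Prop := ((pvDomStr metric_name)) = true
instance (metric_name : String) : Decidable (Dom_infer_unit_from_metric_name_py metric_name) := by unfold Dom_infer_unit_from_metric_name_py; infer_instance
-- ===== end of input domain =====

-- B replaces A's seven ordered substring-group checks by a single left-to-right scan of the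
-- lowercased name: at each underscore position it takes the best priority rank of a pattern
-- anchored there (prefix match), and the overall minimum rank selects the unit (objective:
-- alternative algorithm, same cost).

-- ===== PORT A =====
-- Port of A: lowercase once, then the seven if-branches in order.
def infer_unit_from_metric_name_py (metric_name : String) : String :=
  let name_lower := PySem.Str.lower metric_name
  if ["_seconds", "_duration_s"].any (fun x => PySem.Str.isIn x name_lower) then "s"
  else if ["_milliseconds", "_duration_ms", "_ms"].any (fun x => PySem.Str.isIn x name_lower) then "ms"
  else if ["_microseconds", "_duration_us", "_us"].any (fun x => PySem.Str.isIn x name_lower) then "us"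
  else if ["_bytes", "_size"].any (fun x => PySem.Str.isIn x name_lower) then "bytes"
  else if ["_percent", "_perc", "_usage"].any (fun x => PySem.Str.isIn x name_lower) then "%"
  else if ["_rate", "_per_s", "_toks_per_s"].any (fun x => PySem.Str.isIn x name_lower) then "/s"
  else if ["_count", "_total", "_requests"].any (fun x => PySem.Str.isIn x name_lower) then "count"
  else ""

-- ===== PORT B =====
-- B: flat priority list of (pattern, unit); one scan over the name, prefix-matching at each
-- underscore position, keeping the minimum rank; the minimum rank's unit is the answer.
def pvFlat : List (String × String) :=
  [("_seconds", "s"), ("_duration_s", "s"),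
   ("_milliseconds", "ms"), ("_duration_ms", "ms"), ("_ms", "ms"),
   ("_microseconds", "us"), ("_duration_us", "us"), ("_us", "us"),
   ("_bytes", "bytes"), ("_size", "bytes"),
   ("_percent", "%"), ("_perc", "%"), ("_usage", "%"),
   ("_rate", "/s"), ("_per_s", "/s"), ("_toks_per_s", "/s"),
   ("_count", "count"), ("_total", "count"), ("_requests", "count")]

-- rank of the highest-priority pattern that starts at this suffix (findIdx = length if none,
-- exactly Source B's _rank_at)
def pvRankAt (s : List Char) : Nat :=
  pvFlat.findIdx (fun pu => pu.1.toList.isPrefixOf s)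

-- the scan over the name: at each underscore position fold in the rank anchored there
def pvScan : List Char → Nat → Nat
  | [], best => best
  | c :: rest, best => pvScan rest (if c = '_' then min best (pvRankAt (c :: rest)) else best)

def infer_unit_from_metric_name_py_alt (metric_name : String) : String :=
  let name := (PySem.Str.lower metric_name).toList
  let best := pvScan name pvFlat.length
  match pvFlat[best]? with
  | some pu => pu.2
  | none => ""

-- ===== PRECONDITION & SPEC =====
def Spec_infer_unit_from_metric_name_py (metric_name : String) (out : String) : Prop := out = infer_unit_from_metric_name_py_alt metric_name
instance (metric_name : String) (out : String) : Decidable (Spec_infer_unit_from_metric_name_py metric_name out) := by unfold Spec_infer_unit_from_metric_name_py; infer_instance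

-- ===== CLAIM =====
def Claim_equal_infer_unit_from_metric_name_py : Prop := ∀ (metric_name : String), Dom_infer_unit_from_metric_name_py metric_name → Spec_infer_unit_from_metric_name_py metric_name (infer_unit_from_metric_name_py metric_name)

-- ===== LEMMAS AND PROOFS =====

theorem pv_decide_prefix_eq (l1 l2 : List Char) : decide (l1 <+: l2) = l1.isPrefixOf l2 := by
  by_cases h : l1 <+: l2
  · rw [decide_eq_true h]; exact (List.isPrefixOf_iff_prefix.mpr h).symm
  · rw [decide_eq_false h]
    rw [eq_comm, ← Bool.not_eq_true, List.isPrefixOf_iff_prefix]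
    exact h

theorem pv_findIdx_or {a : Type} (p q : a → Bool) (xs : List a) :
    xs.findIdx (fun x => p x || q x) = min (xs.findIdx p) (xs.findIdx q) := by
  induction xs with
  | nil => simp
  | cons x xs ih =>
    cases hp : p x <;> cases hq : q x <;>
      simp only [List.findIdx_cons, hp, hq, Bool.or_false, Bool.or_true, cond_true,
        cond_false, ih] <;> omega

theorem pv_rankAt_non_underscore (c : Char) (h : ¬ c = '_') (rest : List Char) :
    pvRankAt (c :: rest) = pvFlat.length := by
  apply List.findIdx_eq_length.mpr
  intro pu hpu
  have hall : ∀ pu ∈ pvFlat, pu.1.toList.head? = some '_' := by decide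
  have hh := hall pu hpu
  cases e : pu.1.toList with
  | nil => rw [e] at hh; simp at hh
  | cons a t =>
    rw [e] at hh
    simp at hh
    subst hh
    simp [List.isPrefixOf_cons₂]
    intro he
    exact absurd he.symm h

-- minimum rank over all suffixes, via the infix characterisation
def pvBestOf : List Char → Nat
  | [] => pvFlat.length
  | c :: rest => if c = '_' then min (pvRankAt (c :: rest)) (pvBestOf rest) else pvBestOf rest

theorem pv_scan_eq (l : List Char) : ∀ b, b ≤ pvFlat.length → pvScan l b = min b (pvBestOf l) := by
  induction l with
  | nil => intro b hb; simp [pvScan, pvBestOf]; omega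
  | cons c rest ih =>
    intro b hb
    by_cases hc : c = '_'
    · have hb' : min b (pvRankAt (c :: rest)) ≤ pvFlat.length := by omega
      simp only [pvScan, pvBestOf, if_pos hc, ih _ hb']
      omega
    · simp only [pvScan, pvBestOf, if_neg hc, ih _ hb]

theorem pv_bestOf_eq (l : List Char) :
    pvBestOf l = pvFlat.findIdx (fun pu => decide (pu.1.toList <:+: l)) := by
  induction l with
  | nil =>
    have h : ∀ pu ∈ pvFlat, decide (pu.1.toList <:+: ([] : List Char)) = false := by decide
    rw [List.findIdx_eq_length.mpr h]; rfl
  | cons c rest ih =>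
    have hsplit : (fun pu : String × String => decide (pu.1.toList <:+: (c :: rest)))
        = fun pu => (pu.1.toList.isPrefixOf (c :: rest) || decide (pu.1.toList <:+: rest)) := by
      funext pu
      rw [← pv_decide_prefix_eq]
      simp [List.infix_cons_iff]
    rw [hsplit, pv_findIdx_or]
    by_cases hc : c = '_'
    · simp [pvBestOf, hc, ih, pvRankAt]
    · simp only [pvBestOf, if_neg hc, ih]
      have h1 : (pvFlat.findIdx fun pu => pu.1.toList.isPrefixOf (c :: rest)) = pvFlat.length :=
        pv_rankAt_non_underscore c hc rest
      have h2 := List.findIdx_le_length (p := fun pu : String × String => decide (pu.1.toList <:+: rest)) (xs := pvFlat)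
      omega

-- ===== VERDICT =====
theorem infer_unit_from_metric_name_py_spec : Claim_equal_infer_unit_from_metric_name_py := by
  intro metric_name _
  unfold Spec_infer_unit_from_metric_name_py infer_unit_from_metric_name_py infer_unit_from_metric_name_py_alt
  dsimp only
  have hIsIn : ∀ p : String, PySem.Str.isIn p (PySem.Str.lower metric_name)
      = decide (p.toList <:+: (PySem.Str.lower metric_name).toList) := by
    intro p
    by_cases h : p.toList <:+: (PySem.Str.lower metric_name).toList
    · rw [decide_eq_true h]; exact (PySem.Str.isIn_iff_infix _ _).mpr h
    · rw [decide_eq_false h, ← Bool.not_eq_true, PySem.Str.isIn_iff_infix]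
      exact h
  rw [pv_scan_eq _ _ (Nat.le_refl _), pv_bestOf_eq]
  have hle := List.findIdx_le_length (p := fun pu : String × String => decide (pu.1.toList <:+: (PySem.Str.lower metric_name).toList)) (xs := pvFlat)
  rw [Nat.min_eq_right hle]
  simp only [List.any_cons, List.any_nil, hIsIn]
  set l := (PySem.Str.lower metric_name).toList with hl
  by_cases h1 : ['_', 's', 'e', 'c', 'o', 'n', 'd', 's'] <:+: l
  · simp [pvFlat, List.findIdx_cons, h1]
  ·
    by_cases h2 : ['_', 'd', 'u', 'r', 'a', 't', 'i', 'o', 'n', '_', 's'] <:+: l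
    · simp [pvFlat, List.findIdx_cons, h1, h2]
    ·
      by_cases h3 : ['_', 'm', 'i', 'l', 'l', 'i', 's', 'e', 'c', 'o', 'n', 'd', 's'] <:+: l
      · simp [pvFlat, List.findIdx_cons, h1, h2, h3]
      ·
        by_cases h4 : ['_', 'd', 'u', 'r', 'a', 't', 'i', 'o', 'n', '_', 'm', 's'] <:+: l
        · simp [pvFlat, List.findIdx_cons, h1, h2, h3, h4]
        ·
          by_cases h5 : ['_', 'm', 's'] <:+: l
          · simp [pvFlat, List.findIdx_cons, h1, h2, h3, h4, h5]
          ·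
            by_cases h6 : ['_', 'm', 'i', 'c', 'r', 'o', 's', 'e', 'c', 'o', 'n', 'd', 's'] <:+: l
            · simp [pvFlat, List.findIdx_cons, h1, h2, h3, h4, h5, h6]
            ·
              by_cases h7 : ['_', 'd', 'u', 'r', 'a', 't', 'i', 'o', 'n', '_', 'u', 's'] <:+: l
              · simp [pvFlat, List.findIdx_cons, h1, h2, h3, h4, h5, h6, h7]
              ·
                by_cases h8 : ['_', 'u', 's'] <:+: l
                · simp [pvFlat, List.findIdx_cons, h1, h2, h3, h4, h5, h6, h7, h8]
                ·
                  by_cases h9 : ['_', 'b', 'y', 't', 'e', 's'] <:+: l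
                  · simp [pvFlat, List.findIdx_cons, h1, h2, h3, h4, h5, h6, h7, h8, h9]
                  ·
                    by_cases h10 : ['_', 's', 'i', 'z', 'e'] <:+: l
                    · simp [pvFlat, List.findIdx_cons, h1, h2, h3, h4, h5, h6, h7, h8, h9, h10]
                    ·
                      by_cases h11 : ['_', 'p', 'e', 'r', 'c', 'e', 'n', 't'] <:+: l
                      · simp [pvFlat, List.findIdx_cons, h1, h2, h3, h4, h5, h6, h7, h8, h9, h10, h11]
                      ·
                        by_cases h12 : ['_', 'p', 'e', 'r', 'c'] <:+: l
                        · simp [pvFlat, List.findIdx_cons, h1, h2, h3, h4, h5, h6, h7, h8, h9, h10, h11, h12]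
                        ·
                          by_cases h13 : ['_', 'u', 's', 'a', 'g', 'e'] <:+: l
                          · simp [pvFlat, List.findIdx_cons, h1, h2, h3, h4, h5, h6, h7, h8, h9, h10, h11, h12, h13]
                          ·
                            by_cases h14 : ['_', 'r', 'a', 't', 'e'] <:+: l
                            · simp [pvFlat, List.findIdx_cons, h1, h2, h3, h4, h5, h6, h7, h8, h9, h10, h11, h12, h13, h14]
                            ·
                              by_cases h15 : ['_', 'p', 'e', 'r', '_', 's'] <:+: l
                              · simp [pvFlat, List.findIdx_cons, h1, h2, h3, h4, h5, h6, h7, h8, h9, h10, h11, h12, h13, h14, h15]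
                              ·
                                by_cases h16 : ['_', 't', 'o', 'k', 's', '_', 'p', 'e', 'r', '_', 's'] <:+: l
                                · simp [pvFlat, List.findIdx_cons, h1, h2, h3, h4, h5, h6, h7, h8, h9, h10, h11, h12, h13, h14, h15, h16]
                                ·
                                  by_cases h17 : ['_', 'c', 'o', 'u', 'n', 't'] <:+: l
                                  · simp [pvFlat, List.findIdx_cons, h1, h2, h3, h4, h5, h6, h7, h8, h9, h10, h11, h12, h13, h14, h15, h16, h17]
                                  ·
                                    by_cases h18 : ['_', 't', 'o', 't', 'a', 'l'] <:+: l
                                    · simp [pvFlat, List.findIdx_cons, h1, h2, h3, h4, h5, h6, h7, h8, h9, h10, h11, h12, h13, h14, h15, h16, h17, h18]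
                                    ·
                                      by_cases h19 : ['_', 'r', 'e', 'q', 'u', 'e', 's', 't', 's'] <:+: l
                                      · simp [pvFlat, List.findIdx_cons, h1, h2, h3, h4, h5, h6, h7, h8, h9, h10, h11, h12, h13, h14, h15, h16, h17, h18, h19]
                                      · simp [pvFlat, List.findIdx_cons, h1, h2, h3, h4, h5, h6, h7, h8, h9, h10, h11, h12, h13, h14, h15, h16, h17, h18, h19]
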